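-- pv_equiv track=rewrite | github.com/CoderChick16/somerandomcode | ArrayPartioning.py | arrayPartition
-- ===== SOURCE A (Python) =====
-- def arrayPartition(a):
--     p_arr = []
--     for i in a:
--         if i==0:
--             p_arr.append(i)
--     for i in a:
--         if i != 0:
--             p_arr.append(i)
--     return p_arr
-- ===== SOURCE B (Python) =====
-- def arrayPartition(a):
--     return sorted(a, key=lambda x: x != 0)
-- ===== Notes on version B (the rewrite author's own statement) =====
-- stated objective: idiomatic
-- what changed: Replaces the two filtering append-loops with a single stable sort on the boolean key (x != 0), so zeros (key False) come first and non-zeros follow, each in original order.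
import Mathlib
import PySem

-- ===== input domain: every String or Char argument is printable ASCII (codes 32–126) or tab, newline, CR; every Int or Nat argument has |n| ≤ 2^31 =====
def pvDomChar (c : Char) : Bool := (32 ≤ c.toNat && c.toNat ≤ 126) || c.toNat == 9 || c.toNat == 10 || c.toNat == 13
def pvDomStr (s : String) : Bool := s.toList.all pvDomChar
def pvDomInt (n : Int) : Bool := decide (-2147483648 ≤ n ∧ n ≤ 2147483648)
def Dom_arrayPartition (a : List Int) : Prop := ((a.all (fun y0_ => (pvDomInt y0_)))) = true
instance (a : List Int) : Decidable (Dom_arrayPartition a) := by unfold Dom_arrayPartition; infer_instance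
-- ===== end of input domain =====

-- B replaces A's two filtering loops by one stable sort on the boolean key (x != 0); idiomatic, not faster.

-- ===== PORT A =====
def arrayPartition (a : List Int) : List Int :=
  let p1 := a.foldl (fun acc i => if i == 0 then acc ++ [i] else acc) []
  a.foldl (fun acc i => if i != 0 then acc ++ [i] else acc) p1

-- ===== PORT B =====
def arrayPartition_alt (a : List Int) : List Int :=
  PySem.List.sorted a (fun x => decide (x ≠ 0))

-- ===== PRECONDITION & SPEC =====
def Spec_arrayPartition (a : List Int) (out : List Int) : Prop := out = arrayPartition_alt a
instance (a : List Int) (out : List Int) : Decidable (Spec_arrayPartition a out) := by unfold Spec_arrayPartition; infer_instance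

-- ===== CLAIM (what is proved, stated in full; the proofs are below) =====
def Claim_equal_arrayPartition : Prop := ∀ (a : List Int), Dom_arrayPartition a → Spec_arrayPartition a (arrayPartition a)

-- ===== LEMMAS AND PROOFS =====

-- Inserting x into (zeros ++ nonzeros) with the boolean key order: a zero goes between the
-- two blocks, a non-zero goes to the very end (stable insertion).
theorem insertBy_blocks (key : Int → Bool) (x : Int) (zs os : List Int)
    (hz : ∀ z ∈ zs, key z = false) (ho : ∀ o ∈ os, key o = true) :
    PySem.List.insertBy (fun a b => decide (key a < key b)) x (zs ++ os) =
      if key x then (zs ++ os) ++ [x] else zs ++ [x] ++ os := by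
  induction zs with
  | nil =>
    simp only [List.nil_append]
    cases hx : key x
    · cases os with
      | nil => simp [PySem.List.insertBy]
      | cons o t =>
        have : key o = true := ho o (by simp)
        simp [PySem.List.insertBy, this, hx]
    · exact PySem.List.insertBy_of_forall_not_before _ _ _ (by
        intro y hy; simp [ho y hy, hx])
  | cons z t ih =>
    have hkz : key z = false := hz z (by simp)
    have ih' := ih (fun y hy => hz y (by simp [hy]))
    cases hx : key x
    · simp only [List.cons_append, PySem.List.insertBy]
      simp [hkz, hx, ih']
    · simp only [List.cons_append, PySem.List.insertBy]
      simp [hkz, hx, ih']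

-- The insertion-sort fold over a two-block accumulator keeps the two blocks:
-- zeros accumulate after zs, non-zeros after os.
theorem foldl_insertBy_blocks (key : Int → Bool) (xs zs os : List Int)
    (hz : ∀ z ∈ zs, key z = false) (ho : ∀ o ∈ os, key o = true) :
    List.foldl (fun acc x => PySem.List.insertBy (fun a b => decide (key a < key b)) x acc)
        (zs ++ os) xs =
      (zs ++ xs.filter (fun x => key x = false)) ++ (os ++ xs.filter (fun x => key x)) := by
  induction xs generalizing zs os with
  | nil => simp
  | cons x t ih =>
    simp only [List.foldl_cons]
    rw [insertBy_blocks key x zs os hz ho]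
    cases hx : key x
    · rw [if_neg (by simp)]
      have := ih (zs ++ [x]) os
        (by intro y hy; rcases List.mem_append.1 hy with h | h
            · exact hz y h
            · simp at h; simpa [h] using hx) ho
      rw [show zs ++ [x] ++ os = (zs ++ [x]) ++ os by simp, this]
      simp [List.filter, hx]
    · rw [if_pos rfl]
      have := ih zs (os ++ [x]) hz
        (by intro y hy; rcases List.mem_append.1 hy with h | h
            · exact ho y h
            · simp at h; simpa [h] using hx)
      rw [show (zs ++ os) ++ [x] = zs ++ (os ++ [x]) by simp, this]
      simp [List.filter, hx]

-- A's append-if loop is a filter (specialisation of PySem.List.foldl_append_if to f = id).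
theorem foldl_append_if_id (p : Int → Bool) (l acc : List Int) :
    List.foldl (fun a x => if p x then a ++ [x] else a) acc l = acc ++ l.filter p := by
  simpa using PySem.List.foldl_append_if p id l acc

theorem arrayPartition_spec : Claim_equal_arrayPartition := by
  intro a _
  unfold Spec_arrayPartition arrayPartition arrayPartition_alt
  rw [PySem.List.sorted_eq_foldl_insertBy]
  have h := foldl_insertBy_blocks (fun x => decide (x ≠ 0)) a [] []
    (by simp) (by simp)
  simp only [List.nil_append] at h
  rw [h, foldl_append_if_id, foldl_append_if_id]
  simp only [List.nil_append]
  congr 1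
  · apply List.filter_congr; intro x _; by_cases hx : x = 0 <;> simp [hx]
  · apply List.filter_congr; intro x _; by_cases hx : x = 0 <;> simp [hx]
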